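-- pv_equiv track=rewrite | github.com/IhorKlimov/NQueens | main.py | get_num_of_vertical_conflicts
-- ===== SOURCE A (Python) =====
-- def get_num_of_vertical_conflicts(arr):
--     num_of_conflicts = 0
--
--     for col in range(len(arr[0])):
--         for row in range(len(arr)):
--             if arr[row][col] == 1 and row < len(arr) - 1:
--                 for r in range(row + 1, len(arr)):
--                     if arr[r][col] == 1:
--                         num_of_conflicts += 1
--                         break
--
--     return num_of_conflicts
-- ===== SOURCE B (Python) =====
-- def get_num_of_vertical_conflicts(arr):
--     # one row-major pass maintaining per-column queen counts, then a closed
--     # form per column: a column with k queens contributes k - 1 conflicts.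
--     counts = [0] * len(arr[0])
--     for row in arr:
--         for c in range(len(counts)):
--             if row[c] == 1:
--                 counts[c] += 1
--     total = 0
--     for k in counts:
--         if k > 0:
--             total += k - 1
--     return total
-- ===== Notes on version B (the rewrite author's own statement) =====
-- stated objective: faster
-- what changed: Replaced A's column-major triple loop (for each queen, rescan all rows below it in its column) with one row-major pass that builds per-column queen counts and the closed form: a column with k>0 queens contributes k-1 conflicts.
import Mathlib
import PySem

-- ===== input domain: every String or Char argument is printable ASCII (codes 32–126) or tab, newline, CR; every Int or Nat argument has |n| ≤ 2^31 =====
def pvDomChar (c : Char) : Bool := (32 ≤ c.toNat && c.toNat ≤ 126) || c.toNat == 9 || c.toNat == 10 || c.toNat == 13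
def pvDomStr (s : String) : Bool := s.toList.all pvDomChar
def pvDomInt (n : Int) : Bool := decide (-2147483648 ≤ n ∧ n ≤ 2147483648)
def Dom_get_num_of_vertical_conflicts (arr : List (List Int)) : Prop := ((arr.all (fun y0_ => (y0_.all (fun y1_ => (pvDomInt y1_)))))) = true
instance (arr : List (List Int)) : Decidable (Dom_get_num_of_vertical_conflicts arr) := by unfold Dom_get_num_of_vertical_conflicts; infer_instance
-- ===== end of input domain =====

-- B replaces A's column-major triple loop (for every queen, rescan the rows below it)
-- by one row-major pass building per-column queen counts and the closed form k-1 per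
-- column: objective = faster (asymptotic).

-- ===== PORT A =====
-- inner 'for r in range(row+1, len(arr)): if arr[r][col]==1: num+=1; break'
def pvInnerA (arr : List (List Int)) (col : Int) : List Int → Int
  | [] => 0
  | r :: rest =>
    if PySem.List.pyGetD (PySem.List.pyGetD arr r []) col 0 = 1 then 1
    else pvInnerA arr col rest

def get_num_of_vertical_conflicts (arr : List (List Int)) : Int :=
  (PySem.List.pyRange 0 ((PySem.List.pyGetD arr 0 []).length : Int) 1).foldl (fun acc col =>
    (PySem.List.pyRange 0 (arr.length : Int) 1).foldl (fun acc row =>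
      if PySem.List.pyGetD (PySem.List.pyGetD arr row []) col 0 = 1 ∧ row < (arr.length : Int) - 1 then
        acc + pvInnerA arr col (PySem.List.pyRange (row + 1) (arr.length : Int) 1)
      else acc) acc) 0

-- ===== PORT B =====
def get_num_of_vertical_conflicts_alt (arr : List (List Int)) : Int :=
  (arr.foldl (fun counts row =>
      counts.mapIdx (fun c k =>
        if PySem.List.pyGetD row (c : Int) 0 = 1 then k + 1 else k))
    (List.replicate (PySem.List.pyGetD arr 0 []).length 0)).foldl
    (fun acc k => if k > 0 then acc + (k - 1) else acc) 0

-- ===== PRECONDITION & SPEC =====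
-- Pre_ excludes exactly the inputs on which the Python A raises IndexError:
-- the empty board (arr[0]) and ragged boards with a row shorter than the first row
-- (arr[row][col]); the Python B raises there as well.
def Pre_get_num_of_vertical_conflicts (arr : List (List Int)) : Prop :=
  arr ≠ [] ∧ ∀ row ∈ arr, (arr.headD []).length ≤ row.length
instance (arr : List (List Int)) : Decidable (Pre_get_num_of_vertical_conflicts arr) := by
  unfold Pre_get_num_of_vertical_conflicts; infer_instance

def pvWitness_get_num_of_vertical_conflicts : List (List Int) := [[1, 0], [1, 1]]

def Spec_get_num_of_vertical_conflicts (arr : List (List Int)) (out : Int) : Prop := out = get_num_of_vertical_conflicts_alt arr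
instance (arr : List (List Int)) (out : Int) : Decidable (Spec_get_num_of_vertical_conflicts arr out) := by unfold Spec_get_num_of_vertical_conflicts; infer_instance

-- ===== CLAIM (what is proved, stated in full; the proofs are below) =====
def Claim_equal_get_num_of_vertical_conflicts : Prop := ∀ (arr : List (List Int)), Dom_get_num_of_vertical_conflicts arr → Pre_get_num_of_vertical_conflicts arr → Spec_get_num_of_vertical_conflicts arr (get_num_of_vertical_conflicts arr)

-- ===== LEMMAS AND PROOFS =====

-- whether arr[row][col] == 1 (with pyGetD defaults, as both ports read it)
def pvColHit (col : Int) (row : List Int) : Bool :=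
  decide (PySem.List.pyGetD row col 0 = 1)

-- per-column value A's middle loop accumulates, read off the row list
def pvGcol (col : Int) : List (List Int) → Int
  | [] => 0
  | row :: rest =>
    (if pvColHit col row && rest.any (pvColHit col) then 1 else 0) + pvGcol col rest

theorem pvFoldlAdd (l : List Int) (init : Int) :
    l.foldl (fun acc k => if k > 0 then acc + (k - 1) else acc) init
      = init + (l.map (fun k => if k > 0 then k - 1 else 0)).sum := by
  induction l generalizing init with
  | nil => simp
  | cons x xs ih => simp only [List.foldl_cons, List.map_cons, List.sum_cons, ih]; split <;> ring

theorem pvFoldlAddGen {β : Type} (g : β → Int) (l : List β) (init : Int) :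
    l.foldl (fun acc x => acc + g x) init = init + (l.map g).sum := by
  induction l generalizing init with
  | nil => simp
  | cons x xs ih => simp only [List.foldl_cons, List.map_cons, List.sum_cons, ih]; ring

theorem pvInnerA_eq (arr : List (List Int)) (col : Int) :
    ∀ (n : Nat) (a : Int), 0 ≤ a → n = ((arr.length : Int) - a).toNat →
    pvInnerA arr col (PySem.List.pyRange a (arr.length : Int) 1)
      = if (arr.drop a.toNat).any (pvColHit col) then 1 else 0 := by
  intro n
  induction n with
  | zero =>
    intro a ha hn
    have hge : (arr.length : Int) ≤ a := by omega
    rw [PySem.List.pyRange_one_eq_nil hge]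
    have : arr.length ≤ a.toNat := by omega
    simp [pvInnerA, List.drop_eq_nil_of_le this]
  | succ n ih =>
    intro a ha hn
    have hlt : a < (arr.length : Int) := by omega
    rw [PySem.List.pyRange_one_cons hlt]
    have hnat : a.toNat < arr.length := by omega
    have hget : PySem.List.pyGetD arr a [] = arr[a.toNat] :=
      PySem.List.pyGetD_eq_getElem arr [] ha hlt
    have hdrop : arr.drop a.toNat = arr[a.toNat] :: arr.drop (a.toNat + 1) :=
      (List.getElem_cons_drop hnat).symm
    rw [pvInnerA, hget, hdrop, List.any_cons]
    by_cases hhit : arr[a.toNat] ∈ ({x | PySem.List.pyGetD x col 0 = 1} : Set (List Int))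
    · simp only [Set.mem_setOf_eq] at hhit
      simp [hhit, pvColHit]
    · simp only [Set.mem_setOf_eq] at hhit
      have h1 : pvColHit col arr[a.toNat] = false := by simp [pvColHit, hhit]
      rw [if_neg hhit, ih (a + 1) (by omega) (by omega)]
      have : (a + 1).toNat = a.toNat + 1 := by omega
      simp [h1, this]

theorem pvMid_eq (arr : List (List Int)) (col : Int) :
    ∀ (n : Nat) (a acc : Int), 0 ≤ a → n = ((arr.length : Int) - a).toNat →
    (PySem.List.pyRange a (arr.length : Int) 1).foldl (fun acc row =>
      if PySem.List.pyGetD (PySem.List.pyGetD arr row []) col 0 = 1 ∧ row < (arr.length : Int) - 1 then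
        acc + pvInnerA arr col (PySem.List.pyRange (row + 1) (arr.length : Int) 1)
      else acc) acc
      = acc + pvGcol col (arr.drop a.toNat) := by
  intro n
  induction n with
  | zero =>
    intro a acc ha hn
    have hge : (arr.length : Int) ≤ a := by omega
    rw [PySem.List.pyRange_one_eq_nil hge]
    have : arr.length ≤ a.toNat := by omega
    simp [pvGcol, List.drop_eq_nil_of_le this]
  | succ n ih =>
    intro a acc ha hn
    have hlt : a < (arr.length : Int) := by omega
    rw [PySem.List.pyRange_one_cons hlt]
    have hnat : a.toNat < arr.length := by omega
    have hget : PySem.List.pyGetD arr a [] = arr[a.toNat] :=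
      PySem.List.pyGetD_eq_getElem arr [] ha hlt
    have hsucc : (a + 1).toNat = a.toNat + 1 := by omega
    have hdrop : arr.drop a.toNat = arr[a.toNat] :: arr.drop (a.toNat + 1) :=
      (List.getElem_cons_drop hnat).symm
    rw [List.foldl_cons, ih (a + 1) _ (by omega) (by omega), hdrop, pvGcol, hsucc]
    have hinner := pvInnerA_eq arr col ((arr.length : Int) - (a + 1)).toNat (a + 1)
      (by omega) rfl
    rw [hsucc] at hinner
    rw [hget, hinner]
    by_cases hhit : PySem.List.pyGetD arr[a.toNat] col 0 = 1
    · have h1 : pvColHit col arr[a.toNat] = true := by simp [pvColHit, hhit]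
      by_cases hlast : a < (arr.length : Int) - 1
      · simp only [hhit, hlast, and_self, if_true, h1, Bool.true_and]
        by_cases hany : (arr.drop (a.toNat + 1)).any (pvColHit col) = true
        · simp [hany]; ring
        · simp [hany]
      · have hempty : arr.drop (a.toNat + 1) = [] :=
          List.drop_eq_nil_of_le (by omega)
        simp [hhit, hlast, hempty]
    · have h1 : pvColHit col arr[a.toNat] = false := by simp [pvColHit, hhit]
      simp [hhit, h1]

theorem pvGcol_closed (col : Int) (l : List (List Int)) :
    pvGcol col l = if l.any (pvColHit col)
      then (l.countP (pvColHit col) : Int) - 1 else 0 := by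
  induction l with
  | nil => simp [pvGcol]
  | cons row rest ih =>
    rw [pvGcol, ih, List.any_cons, List.countP_cons]
    by_cases h : pvColHit col row = true
    · by_cases hr : rest.any (pvColHit col) = true
      · have : 0 < rest.countP (pvColHit col) := List.countP_pos_iff.mpr (by
          rcases List.any_eq_true.mp hr with ⟨x, hx, hp⟩; exact ⟨x, hx, hp⟩)
        simp [h, hr]
      · have : rest.countP (pvColHit col) = 0 := by
          rw [List.countP_eq_zero]; intro x hx
          exact fun hp => hr (List.any_eq_true.mpr ⟨x, hx, hp⟩)
        simp [h, hr, this]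
    · have h0 : pvColHit col row = false := Bool.eq_false_iff.mpr h
      simp [h0]

-- B's accumulation of per-column counts, as a map over the column indices
theorem pvMapIdx_map_range (g : Nat → Int → Int) (f : Nat → Int) (w : Nat) :
    List.mapIdx g ((List.range w).map f) = (List.range w).map (fun c => g c (f c)) := by
  apply List.ext_getElem
  · simp
  · intro i h1 h2
    simp

theorem pvCounts_eq (w : Nat) (l : List (List Int)) :
    ∀ (f : Nat → Int),
    l.foldl (fun counts row =>
        counts.mapIdx (fun c k =>
          if PySem.List.pyGetD row (c : Int) 0 = 1 then k + 1 else k))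
      ((List.range w).map f)
      = (List.range w).map (fun c => f c + (l.countP (pvColHit (c : Int)) : Int)) := by
  induction l with
  | nil => simp
  | cons row rest ih =>
    intro f
    rw [List.foldl_cons, pvMapIdx_map_range, ih]
    apply List.map_congr_left
    intro c _
    rw [List.countP_cons]
    by_cases h : PySem.List.pyGetD row (c : Int) 0 = 1
    · have hc : pvColHit (c : Int) row = true := by unfold pvColHit; exact decide_eq_true h
      rw [if_pos h]
      simp only [hc, if_true]
      push_cast; ring
    · have hc : pvColHit (c : Int) row = false := by unfold pvColHit; exact decide_eq_false h
      rw [if_neg h]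
      simp only [hc, Bool.false_eq_true, if_false]
      push_cast; ring

-- both sides equal this common value
theorem pvA_closed (arr : List (List Int)) :
    get_num_of_vertical_conflicts arr
      = ((List.range (PySem.List.pyGetD arr 0 []).length).map (fun c : Nat =>
          if arr.any (pvColHit (c : Int))
          then (arr.countP (pvColHit (c : Int)) : Int) - 1 else 0)).sum := by
  unfold get_num_of_vertical_conflicts
  have houter : PySem.List.pyRange 0 ((PySem.List.pyGetD arr 0 []).length : Int) 1
      = List.map (fun k : Nat => (k : Int)) (List.range (PySem.List.pyGetD arr 0 []).length) := by
    rw [PySem.List.pyRange_one]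
    simp only [sub_zero, Int.toNat_natCast, zero_add]
  rw [houter, List.foldl_map]
  have hmid : ∀ (acc : Int) (col : Int),
      (PySem.List.pyRange 0 (arr.length : Int) 1).foldl (fun acc row =>
        if PySem.List.pyGetD (PySem.List.pyGetD arr row []) col 0 = 1 ∧ row < (arr.length : Int) - 1 then
          acc + pvInnerA arr col (PySem.List.pyRange (row + 1) (arr.length : Int) 1)
        else acc) acc = acc + pvGcol col arr := by
    intro acc col
    have := pvMid_eq arr col ((arr.length : Int) - 0).toNat 0 acc (by omega) rfl
    simpa using this
  have hstep : (List.range (PySem.List.pyGetD arr 0 []).length).foldl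
        (fun acc c =>
          (PySem.List.pyRange 0 (arr.length : Int) 1).foldl (fun acc row =>
            if PySem.List.pyGetD (PySem.List.pyGetD arr row []) ((c : Nat) : Int) 0 = 1 ∧ row < (arr.length : Int) - 1 then
              acc + pvInnerA arr ((c : Nat) : Int) (PySem.List.pyRange (row + 1) (arr.length : Int) 1)
            else acc) acc) 0
      = (List.range (PySem.List.pyGetD arr 0 []).length).foldl
          (fun acc (c : Nat) => acc + pvGcol ((c : Nat) : Int) arr) 0 :=
    by apply PySem.List.foldl_congr_mem
       intro acc c _
       exact hmid acc ((c : Nat) : Int)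
  rw [hstep, pvFoldlAddGen (fun c : Nat => pvGcol ((c : Nat) : Int) arr)]
  simp only [zero_add]
  exact congrArg List.sum (List.map_congr_left (fun c _ => pvGcol_closed ((c : Nat) : Int) arr))

theorem pvB_closed (arr : List (List Int)) :
    get_num_of_vertical_conflicts_alt arr
      = ((List.range (PySem.List.pyGetD arr 0 []).length).map (fun c : Nat =>
          if arr.any (pvColHit (c : Int))
          then (arr.countP (pvColHit (c : Int)) : Int) - 1 else 0)).sum := by
  unfold get_num_of_vertical_conflicts_alt
  have hrep : List.replicate (PySem.List.pyGetD arr 0 []).length (0 : Int)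
      = (List.range (PySem.List.pyGetD arr 0 []).length).map (fun _ => (0 : Int)) := by
    simp [List.map_const']
  rw [hrep, pvCounts_eq, pvFoldlAdd]
  simp only [zero_add, List.map_map]
  apply congrArg List.sum
  apply List.map_congr_left
  intro c _
  simp only [Function.comp_apply]
  by_cases h : arr.any (pvColHit (c : Int)) = true
  · have hpos : 0 < arr.countP (pvColHit (c : Int)) := List.countP_pos_iff.mpr (by
      rcases List.any_eq_true.mp h with ⟨x, hx, hp⟩; exact ⟨x, hx, hp⟩)
    have hpos' : ((arr.countP (pvColHit (c : Int)) : Int)) > 0 := by exact_mod_cast hpos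
    rw [if_pos hpos', if_pos h]
  · have h0 : arr.countP (pvColHit (c : Int)) = 0 := by
      rw [List.countP_eq_zero]; intro x hx
      exact fun hp => h (List.any_eq_true.mpr ⟨x, hx, hp⟩)
    simp [h, h0]

-- ===== VERDICT (by name: the statement is the Claim_ definition above) =====
theorem get_num_of_vertical_conflicts_spec : Claim_equal_get_num_of_vertical_conflicts := by
  intro arr _ _
  unfold Spec_get_num_of_vertical_conflicts
  rw [pvA_closed, pvB_closed]
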